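-- pv_equiv track=rewrite | github.com/damiao707/escala01 | escala.py | organizar_por_semanas
-- ===== SOURCE A (Python) =====
-- def organizar_por_semanas(dias_mes):
--     semanas = []
--     semana_atual = []
--
--     for dia in range(1, dias_mes + 1):
--         semana_atual.append(dia)
--         if len(semana_atual) == 7 or dia == dias_mes:
--             semanas.append(semana_atual)
--             semana_atual = []
--
--     return semanas
-- ===== SOURCE B (Python) =====
-- def organizar_por_semanas(dias_mes):
--     return [list(range(i, min(i + 7, dias_mes + 1)))
--             for i in range(1, dias_mes + 1, 7)]
-- ===== Notes on version B (the rewrite author's own statement) =====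
-- stated objective: simpler
-- what changed: Replaces the per-day accumulator loop with a flush condition by direct arithmetic chunking: iterate over week-start days with range(1, dias_mes+1, 7) and build each week as range(i, min(i+7, dias_mes+1)); no running buffer or length/last-day test.
import Mathlib
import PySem

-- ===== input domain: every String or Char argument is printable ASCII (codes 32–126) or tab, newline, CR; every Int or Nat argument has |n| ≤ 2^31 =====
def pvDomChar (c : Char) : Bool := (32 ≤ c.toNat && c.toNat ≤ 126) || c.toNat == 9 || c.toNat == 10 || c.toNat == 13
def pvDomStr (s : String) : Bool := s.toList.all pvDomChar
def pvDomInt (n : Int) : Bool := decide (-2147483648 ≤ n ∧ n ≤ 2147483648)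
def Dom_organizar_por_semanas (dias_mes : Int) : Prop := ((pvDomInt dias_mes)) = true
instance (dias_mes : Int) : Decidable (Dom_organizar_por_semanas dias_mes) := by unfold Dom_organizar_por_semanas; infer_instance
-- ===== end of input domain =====

-- B replaces A's per-day accumulator loop (buffer + flush condition) by arithmetic chunking
-- over week-start days (step-7 range, min clamp); objective: simpler.

-- ===== PORT A =====
-- loop body of A's for-loop (append the day, flush on length 7 or last day)
def pvStepA (dias_mes : Int) (st : List (List Int) × List Int) (dia : Int) :
    List (List Int) × List Int :=
  let semana_atual := st.2 ++ [dia]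
  if semana_atual.length = 7 ∨ dia = dias_mes then (st.1 ++ [semana_atual], [])
  else (st.1, semana_atual)

def organizar_por_semanas (dias_mes : Int) : List (List Int) :=
  ((PySem.List.pyRange 1 (dias_mes + 1) 1).foldl (pvStepA dias_mes) ([], [])).1

-- ===== PORT B =====
def organizar_por_semanas_alt (dias_mes : Int) : List (List Int) :=
  (PySem.List.pyRange 1 (dias_mes + 1) 7).map
    (fun i => PySem.List.pyRange i (min (i + 7) (dias_mes + 1)) 1)

-- ===== PRECONDITION & SPEC =====
def Spec_organizar_por_semanas (dias_mes : Int) (out : List (List Int)) : Prop := out = organizar_por_semanas_alt dias_mes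
instance (dias_mes : Int) (out : List (List Int)) : Decidable (Spec_organizar_por_semanas dias_mes out) := by unfold Spec_organizar_por_semanas; infer_instance

-- ===== CLAIM (what is proved, stated in full; the proofs are below) =====
def Claim_equal_organizar_por_semanas : Prop := ∀ (dias_mes : Int), Dom_organizar_por_semanas dias_mes → Spec_organizar_por_semanas dias_mes (organizar_por_semanas dias_mes)

-- ===== LEMMAS AND PROOFS =====

-- step-7 range: induction forms
theorem pvRange7_nil (a b : Int) (h : b ≤ a) : PySem.List.pyRange a b 7 = [] := by
  rw [PySem.List.pyRange_of_pos a b (by norm_num)]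
  simp [if_neg (by omega : ¬ a < b)]

theorem pvRange7_cons (a b : Int) (h : a < b) :
    PySem.List.pyRange a b 7 = a :: PySem.List.pyRange (a + 7) b 7 := by
  rw [PySem.List.pyRange_of_pos a b (by norm_num),
      PySem.List.pyRange_of_pos (a + 7) b (by norm_num)]
  rw [if_pos h]
  by_cases h7 : a + 7 < b
  · rw [if_pos h7]
    have hN : ((b - a + 7 - 1) / 7).toNat = ((b - (a + 7) + 7 - 1) / 7).toNat + 1 := by
      omega
    rw [hN, List.range_succ_eq_map]
    simp only [List.map_cons, List.map_map]
    congr 1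
    · push_cast; ring
    · exact List.map_congr_left (fun k _ => by
        simp only [Function.comp_apply]; push_cast; ring)
  · rw [if_neg h7]
    have hN : ((b - a + 7 - 1) / 7).toNat = 1 := by omega
    rw [hN]
    simp

-- one chunk of A's fold: from an empty buffer, the days i .. e-1 (e = min (i+7) (n+1))
-- fill the buffer and flush exactly once at day e-1
theorem pvChunk (n i : Int) (hi : i ≤ n) :
    ∀ (k : Nat) (j : Int) (acc : List (List Int)),
      i ≤ j → j < min (i + 7) (n + 1) → min (i + 7) (n + 1) - j ≤ (k : Int) →
      (PySem.List.pyRange j (min (i + 7) (n + 1)) 1).foldl (pvStepA n)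
          (acc, PySem.List.pyRange i j 1)
        = (acc ++ [PySem.List.pyRange i (min (i + 7) (n + 1)) 1], []) := by
  intro k
  induction k with
  | zero =>
    intro j acc h1 h2 h3
    omega
  | succ k ih =>
    intro j acc h1 h2 h3
    rw [PySem.List.pyRange_one_cons h2, List.foldl_cons]
    ·
      have hbuf : PySem.List.pyRange i j 1 ++ [j] = PySem.List.pyRange i (j + 1) 1 := by
        rw [PySem.List.pyRange_one_succ_right h1]
      have hlen : (PySem.List.pyRange i (j + 1) 1).length = (j + 1 - i).toNat := by
        rw [PySem.List.length_pyRange_one]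
      by_cases hlast : j + 1 = min (i + 7) (n + 1)
      · -- the flush fires: the buffer is full or the day is the last of the month
        have hcond : (PySem.List.pyRange i j 1 ++ [j]).length = 7 ∨ j = n := by
          rw [hbuf, hlen]; omega
        simp only [pvStepA, if_pos hcond]
        rw [hbuf, hlast, PySem.List.pyRange_one_eq_nil (le_refl _), List.foldl_nil]
      · -- no flush: the buffer is short and the day is not the last
        have hcond : ¬ ((PySem.List.pyRange i j 1 ++ [j]).length = 7 ∨ j = n) := by
          rw [hbuf, hlen]; omega
        simp only [pvStepA, if_neg hcond]
        rw [hbuf]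
        exact ih (j + 1) acc (by omega) (by omega) (by omega)

-- A's whole fold, week by week
theorem pvWeeks (n : Int) :
    ∀ (k : Nat) (i : Int) (acc : List (List Int)),
      n + 1 - i ≤ (k : Int) →
      (PySem.List.pyRange i (n + 1) 1).foldl (pvStepA n) (acc, [])
        = (acc ++ (PySem.List.pyRange i (n + 1) 7).map
            (fun j => PySem.List.pyRange j (min (j + 7) (n + 1)) 1), []) := by
  intro k
  induction k with
  | zero =>
    intro i acc h
    rw [PySem.List.pyRange_one_eq_nil (by omega), pvRange7_nil _ _ (by omega)]
    simp
  | succ k ih =>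
    intro i acc h
    by_cases hi : i ≤ n
    · have hsplit : PySem.List.pyRange i (n + 1) 1
          = PySem.List.pyRange i (min (i + 7) (n + 1)) 1
            ++ PySem.List.pyRange (min (i + 7) (n + 1)) (n + 1) 1 :=
        PySem.List.pyRange_one_append i (min (i + 7) (n + 1)) (n + 1) (by omega) (by omega)
      rw [hsplit, List.foldl_append]
      have hnil : PySem.List.pyRange i i 1 = [] :=
        PySem.List.pyRange_one_eq_nil (le_refl i)
      have hchunk := pvChunk n i hi 7 i acc (le_refl i) (by omega) (by omega)
      rw [hnil] at hchunk
      rw [hchunk]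
      rw [pvRange7_cons i (n + 1) (by omega), List.map_cons]
      by_cases h7 : i + 7 ≤ n + 1
      · have hmin : min (i + 7) (n + 1) = i + 7 := by omega
        rw [hmin]
        rw [ih (i + 7) (acc ++ [PySem.List.pyRange i (i + 7) 1]) (by omega)]
        simp
      · have hmin : min (i + 7) (n + 1) = n + 1 := by omega
        rw [hmin, PySem.List.pyRange_one_eq_nil (le_refl (n + 1)),
            List.foldl_nil, pvRange7_nil (i + 7) (n + 1) (by omega)]
        simp
    · rw [PySem.List.pyRange_one_eq_nil (by omega), pvRange7_nil _ _ (by omega)]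
      simp

-- ===== VERDICT (by name: the statement is the Claim_ definition above) =====
theorem organizar_por_semanas_spec : Claim_equal_organizar_por_semanas := by
  intro n _
  show organizar_por_semanas n = organizar_por_semanas_alt n
  unfold organizar_por_semanas organizar_por_semanas_alt
  rw [pvWeeks n n.toNat 1 [] (by omega)]
  simp
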